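-- pv_equiv track=rewrite | github.com/Sonali553/Time_Equality | timeEquality.py | Time_To_Equality
-- ===== SOURCE A (Python) =====
-- def Time_To_Equality(lst):
--     maxElement = float('-inf')
--     for ele in lst:
--         if ele > maxElement:
--             maxElement = ele
--     res = 0
--     for ele in lst:
--         res += (maxElement - ele)
--     return res
-- ===== SOURCE B (Python) =====
-- def Time_To_Equality(lst):
--     # Single fused pass: maintain the running max `cur` and the running
--     # deficit `res` = sum(cur - x) over the prefix; when a new max appears,
--     # retroactively raise the deficit of the i elements already seen.
--     if not lst:
--         return 0
--     res = 0
--     cur = lst[0]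
--     for i, ele in enumerate(lst):
--         if ele > cur:
--             res += i * (ele - cur)
--             cur = ele
--         res += cur - ele
--     return res
-- ===== Notes on version B (the rewrite author's own statement) =====
-- stated objective: alternative
-- what changed: Replaces A's two staged passes (find max, then sum the differences) with a single fused pass that keeps a running max and a running deficit, retroactively adding i*(new_max - old_max) for the i elements already seen whenever the running max increases.
import Mathlib
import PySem

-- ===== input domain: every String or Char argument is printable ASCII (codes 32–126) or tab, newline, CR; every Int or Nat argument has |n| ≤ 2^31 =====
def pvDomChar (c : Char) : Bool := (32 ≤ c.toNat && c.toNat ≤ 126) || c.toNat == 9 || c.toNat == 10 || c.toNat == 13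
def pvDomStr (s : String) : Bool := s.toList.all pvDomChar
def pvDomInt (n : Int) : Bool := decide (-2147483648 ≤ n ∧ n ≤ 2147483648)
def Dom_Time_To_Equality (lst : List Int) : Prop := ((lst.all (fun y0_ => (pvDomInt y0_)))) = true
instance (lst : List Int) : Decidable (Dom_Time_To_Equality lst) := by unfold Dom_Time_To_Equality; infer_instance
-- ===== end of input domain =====

-- B fuses A's two staged passes into one pass with a retroactive correction when the running max grows (alternative, same O(n)).

-- ===== PORT A =====
-- maxElement starts at float('-inf'); modelled as Option Int with none = -inf
-- (ele > -inf is always true, so the first element always replaces none).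
def Time_To_Equality (lst : List Int) : Int :=
  let maxElement : Option Int :=
    lst.foldl (fun acc ele =>
      match acc with
      | none => some ele            -- ele > -inf
      | some m => if ele > m then some ele else some m) none
  -- second loop; maxElement is some m whenever the loop body runs
  lst.foldl (fun res ele => res + (maxElement.getD 0 - ele)) 0

-- ===== PORT B =====
-- the loop body of B's single pass: state (res, cur), element (i, ele)
def pvStep (s : Int × Int) (p : Int × Int) : Int × Int :=
  let s' := if p.2 > s.2 then (s.1 + p.1 * (p.2 - s.2), p.2) else s
  (s'.1 + (s'.2 - p.2), s'.2)

-- single pass over enumerate(lst) with state (res, cur)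
def Time_To_Equality_alt (lst : List Int) : Int :=
  match lst with
  | [] => 0
  | x :: _ => ((PySem.List.enumerate lst).foldl pvStep (0, x)).1

-- ===== PRECONDITION & SPEC =====
def Spec_Time_To_Equality (lst : List Int) (out : Int) : Prop := out = Time_To_Equality_alt lst
instance (lst : List Int) (out : Int) : Decidable (Spec_Time_To_Equality lst out) := by unfold Spec_Time_To_Equality; infer_instance

-- ===== CLAIM =====
def Claim_equal_Time_To_Equality : Prop := ∀ (lst : List Int), Dom_Time_To_Equality lst → Spec_Time_To_Equality lst (Time_To_Equality lst)

-- ===== LEMMAS AND PROOFS =====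

-- A's running-max loop, once started, is the ordinary foldl max.
theorem pv_maxfold (t : List Int) (x : Int) :
    t.foldl (fun acc ele =>
      match acc with
      | none => some ele
      | some m => if ele > m then some ele else some m) (some x) = some (t.foldl max x) := by
  induction t generalizing x with
  | nil => rfl
  | cons y t ih =>
      simp only [List.foldl]
      by_cases h : y > x
      · rw [if_pos h, ih, max_eq_right (le_of_lt h)]
      · rw [if_neg h, ih, max_eq_left (le_of_not_gt h)]

-- A's second loop in closed form.
theorem pv_sumfold (xs : List Int) (c r : Int) :
    xs.foldl (fun res ele => res + (c - ele)) r = r + xs.length * c - xs.sum := by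
  induction xs generalizing r with
  | nil => simp
  | cons y t ih => simp [List.foldl, ih]; ring

-- Invariant of B's fused pass: starting at index i with deficit i*cur - S,
-- the pass ends with the total running max and the full closed-form deficit.
theorem pv_bfold (t : List Int) (i : Int) (cur S : Int) :
    (PySem.List.enumerate t i).foldl pvStep (i * cur - S, cur)
    = ((i + t.length) * (t.foldl max cur) - (S + t.sum), t.foldl max cur) := by
  induction t generalizing i cur S with
  | nil => simp
  | cons y t ih =>
      rw [PySem.List.enumerate_cons]
      simp only [List.foldl]
      by_cases h : y > cur
      · have e1 : pvStep (i * cur - S, cur) (i, y)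
            = ((i + 1) * y - (S + y), y) := by
          simp [pvStep, h]; ring
        rw [e1, ih, max_eq_right (le_of_lt h)]
        simp only [List.length_cons, List.sum_cons]; push_cast; ring_nf
      · have e1 : pvStep (i * cur - S, cur) (i, y)
            = ((i + 1) * cur - (S + y), cur) := by
          simp [pvStep, h]; ring
        rw [e1, ih, max_eq_left (le_of_not_gt h)]
        simp only [List.length_cons, List.sum_cons]; push_cast; ring_nf

-- ===== VERDICT =====
theorem Time_To_Equality_spec : Claim_equal_Time_To_Equality := by
  intro lst _
  unfold Spec_Time_To_Equality Time_To_Equality Time_To_Equality_alt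
  cases lst with
  | nil => rfl
  | cons x t =>
      simp only [List.foldl, pv_maxfold, Option.getD_some]
      rw [pv_sumfold]
      have h0 : ((0 : Int), (x : Int)) = ((0 : Int) * x - 0, x) := by norm_num
      rw [h0, pv_bfold (x :: t) 0 x 0]
      simp [List.foldl]
      ring
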